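-- pv_equiv track=rewrite | github.com/LePtC/lebase | times/datecalc.py | get_liTaskId_halfmonth
-- ===== SOURCE A (Python) =====
-- from typing import List
--
-- def get_liTaskId_halfmonth(yearStart: int, monthStart: int, yearEnd: int, monthEnd: int) -> List[str]:
--     """
--     输入：起止年月
--     输出：半月精度的 timelist
--     """
--     resultList = []
--     year = yearStart
--     while year <= yearEnd:
--         month = 1
--         if year == yearStart:
--             month = monthStart
--         monthEndCur = 12
--         if year == yearEnd:
--             monthEndCur = monthEnd
--         while month <= monthEndCur:
--             resultList.append(str(year) + ["", "0"][month < 10] + str(month) + "0111")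
--             resultList.append(str(year) + ["", "0"][month < 10] + str(month) + "1511")
--             month += 1
--         year += 1
--
--     return list(map(lambda x: str(x), resultList))
-- ===== SOURCE B (Python) =====
-- def get_liTaskId_halfmonth(yearStart: int, monthStart: int, yearEnd: int, monthEnd: int):
--     def half_ids(year, month):
--         tag = str(year) + ('0' if month < 10 else '') + str(month)
--         return [tag + '0111', tag + '1511']
--
--     if yearStart > yearEnd:
--         return []
--     if yearStart == yearEnd:
--         return [s for m in range(monthStart, monthEnd + 1) for s in half_ids(yearStart, m)]
--     head = [s for m in range(monthStart, 13) for s in half_ids(yearStart, m)]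
--     mid = [s for i in range((yearStart + 1) * 12, yearEnd * 12)
--              for s in half_ids(i // 12, i % 12 + 1)]
--     tail = [s for m in range(1, monthEnd + 1) for s in half_ids(yearEnd, m)]
--     return head + mid + tail
-- ===== Notes on version B (the rewrite author's own statement) =====
-- stated objective: alternative
-- what changed: Replaces the nested while-loops with per-year boundary guards by a three-part split (first year, full middle years, last year): the middle years are generated by one flat integer month-index range decoded with divmod, and the redundant final map(str, ...) pass is dropped.
import Mathlib
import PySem

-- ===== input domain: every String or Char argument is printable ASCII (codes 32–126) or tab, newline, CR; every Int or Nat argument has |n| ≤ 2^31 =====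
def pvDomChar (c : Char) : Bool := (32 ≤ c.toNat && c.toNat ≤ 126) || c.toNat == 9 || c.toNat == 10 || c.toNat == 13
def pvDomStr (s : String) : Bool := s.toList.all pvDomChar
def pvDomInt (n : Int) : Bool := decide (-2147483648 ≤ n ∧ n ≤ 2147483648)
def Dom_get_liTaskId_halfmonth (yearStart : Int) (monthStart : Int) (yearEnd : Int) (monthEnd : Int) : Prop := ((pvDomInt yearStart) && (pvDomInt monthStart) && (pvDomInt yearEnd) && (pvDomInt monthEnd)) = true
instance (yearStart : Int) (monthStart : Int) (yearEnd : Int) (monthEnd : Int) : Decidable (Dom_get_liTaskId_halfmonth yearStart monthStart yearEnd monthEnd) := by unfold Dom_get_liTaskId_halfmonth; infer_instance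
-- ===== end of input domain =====

-- B replaces A's nested while-loops (with per-year boundary guards) by a first-year/middle/last-year
-- split whose middle is one flat month-index range decoded with divmod; same return value everywhere.

-- ===== PORT A =====
-- inner 'while month <= monthEndCur' loop of A, appending the two id strings per month
def pvInnerA (year : Int) (monthEndCur : Int) (month : Int) (acc : List String) : List String :=
  if month ≤ monthEndCur then
    pvInnerA year monthEndCur (month + 1)
      (acc ++ [PySem.Int.toStr year ++ (if month < 10 then "0" else "") ++ PySem.Int.toStr month ++ "0111",
               PySem.Int.toStr year ++ (if month < 10 then "0" else "") ++ PySem.Int.toStr month ++ "1511"])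
  else acc
termination_by (monthEndCur + 1 - month).toNat
decreasing_by omega

-- outer 'while year <= yearEnd' loop of A
def pvOuterA (yearStart monthStart yearEnd monthEnd : Int) (year : Int) (acc : List String) : List String :=
  if year ≤ yearEnd then
    let month := if year == yearStart then monthStart else 1
    let monthEndCur := if year == yearEnd then monthEnd else 12
    pvOuterA yearStart monthStart yearEnd monthEnd (year + 1) (pvInnerA year monthEndCur month acc)
  else acc
termination_by (yearEnd + 1 - year).toNat
decreasing_by omega

def get_liTaskId_halfmonth (yearStart : Int) (monthStart : Int) (yearEnd : Int) (monthEnd : Int) : List String :=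
  -- final 'list(map(lambda x: str(x), resultList))': str of a str is the string itself
  (pvOuterA yearStart monthStart yearEnd monthEnd yearStart []).map (fun x => x)

-- ===== PORT B =====
-- Source B's helper half_ids(year, month)
def pvHalfIds (year : Int) (month : Int) : List String :=
  let tag := PySem.Int.toStr year ++ (if month < 10 then "0" else "") ++ PySem.Int.toStr month
  [tag ++ "0111", tag ++ "1511"]

def get_liTaskId_halfmonth_alt (yearStart : Int) (monthStart : Int) (yearEnd : Int) (monthEnd : Int) : List String :=
  if yearStart > yearEnd then []
  else if yearStart == yearEnd then
    (PySem.List.pyRange monthStart (monthEnd + 1) 1).flatMap (pvHalfIds yearStart)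
  else
    let head := (PySem.List.pyRange monthStart 13 1).flatMap (pvHalfIds yearStart)
    let mid := (PySem.List.pyRange ((yearStart + 1) * 12) (yearEnd * 12) 1).flatMap
      (fun i => pvHalfIds (PySem.Int.floordiv i 12) (PySem.Int.mod i 12 + 1))
    let tail := (PySem.List.pyRange 1 (monthEnd + 1) 1).flatMap (pvHalfIds yearEnd)
    head ++ mid ++ tail

-- ===== PRECONDITION & SPEC =====
def Spec_get_liTaskId_halfmonth (yearStart : Int) (monthStart : Int) (yearEnd : Int) (monthEnd : Int) (out : List String) : Prop := out = get_liTaskId_halfmonth_alt yearStart monthStart yearEnd monthEnd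
instance (yearStart : Int) (monthStart : Int) (yearEnd : Int) (monthEnd : Int) (out : List String) : Decidable (Spec_get_liTaskId_halfmonth yearStart monthStart yearEnd monthEnd out) := by unfold Spec_get_liTaskId_halfmonth; infer_instance

-- ===== CLAIM (what is proved, stated in full; the proofs are below) =====
def Claim_equal_get_liTaskId_halfmonth : Prop := ∀ (yearStart : Int) (monthStart : Int) (yearEnd : Int) (monthEnd : Int), Dom_get_liTaskId_halfmonth yearStart monthStart yearEnd monthEnd → Spec_get_liTaskId_halfmonth yearStart monthStart yearEnd monthEnd (get_liTaskId_halfmonth yearStart monthStart yearEnd monthEnd)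

-- ===== LEMMAS AND PROOFS =====

-- A's inner loop produces exactly the flatMap of pvHalfIds over the month range
theorem pvInnerA_eq (year hi : Int) : ∀ (month : Int) (acc : List String),
    pvInnerA year hi month acc = acc ++ (PySem.List.pyRange month (hi + 1) 1).flatMap (pvHalfIds year) := by
  suffices h : ∀ (n : Nat) (month : Int) (acc : List String), (hi + 1 - month).toNat = n →
      pvInnerA year hi month acc = acc ++ (PySem.List.pyRange month (hi + 1) 1).flatMap (pvHalfIds year) by
    intro month acc; exact h _ month acc rfl
  intro n
  induction n with
  | zero =>
    intro month acc hn
    rw [pvInnerA, if_neg (by omega), PySem.List.pyRange_one_eq_nil (by omega)]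
    simp
  | succ n ih =>
    intro month acc hn
    by_cases hle : month ≤ hi
    · rw [pvInnerA, if_pos hle, ih (month + 1) _ (by omega),
        PySem.List.pyRange_one_cons (by omega : month < hi + 1)]
      simp [pvHalfIds]
    · rw [pvInnerA, if_neg hle, PySem.List.pyRange_one_eq_nil (by omega)]
      simp

-- the clean per-year recursion A's outer loop computes
def pvYears (yearStart monthStart yearEnd monthEnd : Int) (year : Int) : List String :=
  if year ≤ yearEnd then
    (PySem.List.pyRange (if year == yearStart then monthStart else 1)
        ((if year == yearEnd then monthEnd else 12) + 1) 1).flatMap (pvHalfIds year)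
      ++ pvYears yearStart monthStart yearEnd monthEnd (year + 1)
  else []
termination_by (yearEnd + 1 - year).toNat
decreasing_by omega

theorem pvOuterA_eq (ys ms ye me : Int) : ∀ (year : Int) (acc : List String),
    pvOuterA ys ms ye me year acc = acc ++ pvYears ys ms ye me year := by
  suffices h : ∀ (n : Nat) (year : Int) (acc : List String), (ye + 1 - year).toNat = n →
      pvOuterA ys ms ye me year acc = acc ++ pvYears ys ms ye me year by
    intro year acc; exact h _ year acc rfl
  intro n
  induction n with
  | zero =>
    intro year acc hn
    rw [pvOuterA, if_neg (by omega), pvYears, if_neg (by omega)]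
    simp
  | succ n ih =>
    intro year acc hn
    by_cases hle : year ≤ ye
    · rw [pvOuterA, if_pos hle, pvYears, if_pos hle, ih (year + 1) _ (by omega),
        pvInnerA_eq]
      simp
    · rw [pvOuterA, if_neg hle, pvYears, if_neg hle]
      simp

-- pointwise congruence for flatMap (used to decode the flat month indices)
theorem pvFlatMap_congr {α β : Type} (l : List α) (f g : α → List β)
    (h : ∀ x ∈ l, f x = g x) : l.flatMap f = l.flatMap g := by
  induction l with
  | nil => rfl
  | cons a t ih =>
    simp only [List.flatMap_cons, h a (by simp)]
    rw [ih (fun x hx => h x (by simp [hx]))]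

-- decoding a flat month index inside one year's block
theorem pvDecode_block (y : Int) (ye : Int) (h : y < ye) :
    (PySem.List.pyRange (y * 12) (ye * 12) 1).flatMap
        (fun i => pvHalfIds (PySem.Int.floordiv i 12) (PySem.Int.mod i 12 + 1))
      = (PySem.List.pyRange 1 13 1).flatMap (pvHalfIds y)
        ++ (PySem.List.pyRange ((y + 1) * 12) (ye * 12) 1).flatMap
            (fun i => pvHalfIds (PySem.Int.floordiv i 12) (PySem.Int.mod i 12 + 1)) := by
  rw [PySem.List.pyRange_one_append (y * 12) ((y + 1) * 12) (ye * 12) (by omega) (by omega),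
    List.flatMap_append]
  congr 1
  rw [PySem.List.pyRange_one, PySem.List.pyRange_one]
  have h1 : ((y + 1) * 12 - y * 12).toNat = 12 := by omega
  have h2 : ((13 : Int) - 1).toNat = 12 := by decide
  rw [h1, h2, List.flatMap_map, List.flatMap_map]
  apply pvFlatMap_congr
  intro k hk
  simp only [List.mem_range] at hk
  have hf : PySem.Int.floordiv (y * 12 + (k : Int)) 12 = y := by
    rw [PySem.Int.floordiv_eq_iff_of_pos (by norm_num)]
    omega
  have hmd := PySem.Int.floordiv_mul_add_mod (y * 12 + (k : Int)) 12
  have hm : PySem.Int.mod (y * 12 + (k : Int)) 12 = (k : Int) := by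
    rw [hf] at hmd
    omega
  rw [hf, hm, add_comm (1 : Int) (k : Int)]

-- middle+tail part: for ys < y ≤ ye the remaining years equal the flat mid range plus the tail
theorem pvYears_mid (ys ms ye me : Int) (hlt : ys < ye) : ∀ (y : Int), ys < y → y ≤ ye →
    pvYears ys ms ye me y
      = (PySem.List.pyRange (y * 12) (ye * 12) 1).flatMap
          (fun i => pvHalfIds (PySem.Int.floordiv i 12) (PySem.Int.mod i 12 + 1))
        ++ (PySem.List.pyRange 1 (me + 1) 1).flatMap (pvHalfIds ye) := by
  suffices h : ∀ (n : Nat) (y : Int), (ye - y).toNat = n → ys < y → y ≤ ye →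
      pvYears ys ms ye me y
        = (PySem.List.pyRange (y * 12) (ye * 12) 1).flatMap
            (fun i => pvHalfIds (PySem.Int.floordiv i 12) (PySem.Int.mod i 12 + 1))
          ++ (PySem.List.pyRange 1 (me + 1) 1).flatMap (pvHalfIds ye) by
    intro y h1 h2; exact h _ y rfl h1 h2
  intro n
  induction n with
  | zero =>
    intro y hn h1 h2
    have hy : y = ye := by omega
    subst hy
    rw [pvYears, if_pos le_rfl, pvYears, if_neg (by omega : ¬ y + 1 ≤ y),
      if_neg (by simp only [beq_iff_eq]; omega : ¬ ((y == ys) = true)),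
      if_pos (by simp : (y == y) = true),
      PySem.List.pyRange_one_eq_nil (le_refl (y * 12))]
    simp
  | succ n ih =>
    intro y hn h1 h2
    by_cases hlt : y < ye
    · rw [pvYears, if_pos h2, ih (y + 1) (by omega) (by omega) (by omega),
        pvDecode_block y ye hlt,
        if_neg (by simp only [beq_iff_eq]; omega : ¬ ((y == ys) = true)),
        if_neg (by simp only [beq_iff_eq]; omega : ¬ ((y == ye) = true))]
      simp
    · have hy : y = ye := by omega
      subst hy
      rw [pvYears, if_pos le_rfl, pvYears, if_neg (by omega : ¬ y + 1 ≤ y),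
        if_neg (by simp only [beq_iff_eq]; omega : ¬ ((y == ys) = true)),
        if_pos (by simp : (y == y) = true),
        PySem.List.pyRange_one_eq_nil (le_refl (y * 12))]
      simp

-- ===== VERDICT (by name: the statement is the Claim_ definition above) =====
theorem get_liTaskId_halfmonth_spec : Claim_equal_get_liTaskId_halfmonth := by
  intro ys ms ye me _
  unfold Spec_get_liTaskId_halfmonth get_liTaskId_halfmonth get_liTaskId_halfmonth_alt
  rw [List.map_id_fun', pvOuterA_eq, List.nil_append]
  by_cases h1 : ys > ye
  · rw [if_pos h1, pvYears, if_neg (by omega)]; rfl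
  · rw [if_neg h1]
    by_cases h2 : ys = ye
    · subst h2
      rw [if_pos (by simp : (ys == ys) = true), pvYears, if_pos le_rfl, pvYears,
        if_neg (by omega : ¬ ys + 1 ≤ ys),
        if_pos (by simp : (ys == ys) = true), if_pos (by simp : (ys == ys) = true)]
      simp
    · rw [if_neg (by simp only [beq_iff_eq]; omega : ¬ ((ys == ye) = true)), pvYears,
        if_pos (by omega : ys ≤ ye),
        if_pos (by simp : (ys == ys) = true),
        if_neg (by simp only [beq_iff_eq]; omega : ¬ ((ys == ye) = true)),
        pvYears_mid ys ms ye me (by omega) (ys + 1) (by omega) (by omega)]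
      simp
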